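-- pv_equiv track=rewrite | github.com/superohit/PubMed_Scraper | pubmed_scraper/pubmed_scraper/utils.py | is_non_academic
-- ===== SOURCE A (Python) =====
-- def is_non_academic(affiliation: str) -> bool:
--     academic_keywords = [
--         "university",
--         "college",
--         "institute",
--         "school",
--         "hospital",
--         "center",
--     ]
--     return not any(word.lower() in affiliation.lower() for word in academic_keywords)
-- ===== SOURCE B (Python) =====
-- _KEYWORDS = ("university", "college", "institute", "school", "hospital", "center")
--
-- def is_non_academic(affiliation: str) -> bool:
--     s = affiliation.lower()
--     for i in range(len(s)):
--         for w in _KEYWORDS: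
--             if s.startswith(w, i):
--                 return False
--     return True
-- ===== Notes on version B (the rewrite author's own statement) =====
-- stated objective: alternative
-- what changed: Replaces six independent substring ('in') scans of the lowered string with a single left-to-right index loop that tests, at each position, whether any keyword starts there, returning False at the first hit.
import Mathlib
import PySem

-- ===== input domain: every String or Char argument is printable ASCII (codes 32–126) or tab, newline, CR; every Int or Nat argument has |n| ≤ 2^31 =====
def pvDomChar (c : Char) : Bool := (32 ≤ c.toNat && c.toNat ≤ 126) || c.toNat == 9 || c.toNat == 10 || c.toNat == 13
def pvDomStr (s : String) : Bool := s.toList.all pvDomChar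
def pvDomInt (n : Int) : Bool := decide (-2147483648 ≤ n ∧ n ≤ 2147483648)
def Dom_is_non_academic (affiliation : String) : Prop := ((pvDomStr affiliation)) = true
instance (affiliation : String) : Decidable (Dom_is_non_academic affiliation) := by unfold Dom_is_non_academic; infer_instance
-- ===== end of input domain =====

-- B is an alternative single index-loop scan: at each position of the lowered string it
-- checks whether any keyword starts there, instead of A's six separate substring scans.

-- ===== PORT A =====
-- A: not any(word.lower() in affiliation.lower() for word in academic_keywords)
def is_non_academic (affiliation : String) : Bool :=
  let academic_keywords : List String :=
    ["university", "college", "institute", "school", "hospital", "center"]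
  ! academic_keywords.any (fun word =>
      PySem.Str.isIn (PySem.Str.lower word) (PySem.Str.lower affiliation))

-- ===== PORT B =====
def kwsB : List (List Char) :=
  ["university".toList, "college".toList, "institute".toList,
   "school".toList, "hospital".toList, "center".toList]

-- the loop 'for i in range(len(s)): for w in _KEYWORDS: if s.startswith(w, i): return False'
-- as structural recursion over the suffixes of s (s.startswith(w, i) = startswith (drop i s) w)
def scanB : List Char → Bool
  | [] => true
  | c :: rest =>
      if kwsB.any (fun w => PySem.Chars.startswith (c :: rest) w) then false
      else scanB rest

def is_non_academic_alt (affiliation : String) : Bool :=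
  scanB (PySem.Str.lower affiliation).toList

-- ===== PRECONDITION & SPEC =====
def Spec_is_non_academic (affiliation : String) (out : Bool) : Prop := out = is_non_academic_alt affiliation
instance (affiliation : String) (out : Bool) : Decidable (Spec_is_non_academic affiliation out) := by unfold Spec_is_non_academic; infer_instance

-- ===== CLAIM (what is proved, stated in full; the proofs are below) =====
def Claim_equal_is_non_academic : Prop := ∀ (affiliation : String), Dom_is_non_academic affiliation → Spec_is_non_academic affiliation (is_non_academic affiliation)

-- ===== LEMMAS AND PROOFS =====

lemma kwsB_ne_nil : ∀ w ∈ kwsB, w ≠ [] := by decide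

-- the scan returns true iff no keyword is an infix of s
lemma scanB_true_iff (s : List Char) :
    scanB s = true ↔ ∀ w ∈ kwsB, ¬ w <:+: s := by
  induction s with
  | nil =>
      simp only [scanB, true_iff]
      intro w hw hinf
      exact kwsB_ne_nil w hw (List.eq_nil_of_infix_nil hinf)
  | cons c rest ih =>
      simp only [scanB]
      by_cases h : (kwsB.any (fun w => PySem.Chars.startswith (c :: rest) w)) = true
      · rw [if_pos h]
        refine iff_of_false (by simp) ?_
        intro hall
        rcases List.any_eq_true.mp h with ⟨w, hw, hsw⟩
        exact hall w hw ((PySem.Chars.startswith_iff _ _).mp hsw).isInfix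
      · rw [if_neg h, ih]
        constructor
        · intro hall w hw hinf
          rcases List.infix_cons_iff.mp hinf with hpre | hinf'
          · have hf := List.any_eq_false.mp (by simpa using h) w hw
            exact absurd ((PySem.Chars.startswith_iff _ _).mpr hpre) (by simpa using hf)
          · exact hall w hw hinf'
        · intro hall w hw hinf
          exact hall w hw (hinf.trans (List.suffix_cons c rest).isInfix)

-- the scan over suffixes computes exactly "no keyword occurs as a substring"
lemma scanB_eq (s : List Char) :
    scanB s = ! kwsB.any (fun w => PySem.Chars.isIn w s) := by
  rcases h : kwsB.any (fun w => PySem.Chars.isIn w s) with _ | _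
  · simp only [Bool.not_false]
    refine (scanB_true_iff s).mpr (fun w hw => ?_)
    have hf := List.any_eq_false.mp h w hw
    exact (PySem.Chars.isIn_eq_false_iff w s).mp (by simpa using hf)
  · simp only [Bool.not_true]
    rcases List.any_eq_true.mp h with ⟨w, hw, hin⟩
    have hinf := (PySem.Chars.isIn_iff_infix w s).mp hin
    rcases hb : scanB s with _ | _
    · rfl
    · exact absurd hinf ((scanB_true_iff s).mp hb w hw)

-- ===== VERDICT (by name: the statement is the Claim_ definition above) =====
theorem is_non_academic_spec : Claim_equal_is_non_academic := by
  intro affiliation _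
  unfold Spec_is_non_academic is_non_academic is_non_academic_alt
  have h1 : PySem.Chars.lower "university".toList = "university".toList := by decide
  have h2 : PySem.Chars.lower "college".toList = "college".toList := by decide
  have h3 : PySem.Chars.lower "institute".toList = "institute".toList := by decide
  have h4 : PySem.Chars.lower "school".toList = "school".toList := by decide
  have h5 : PySem.Chars.lower "hospital".toList = "hospital".toList := by decide
  have h6 : PySem.Chars.lower "center".toList = "center".toList := by decide
  simp only [PySem.Str.toList_lower, scanB_eq, kwsB, PySem.Str.isIn_eq,
    List.any_cons, List.any_nil, h1, h2, h3, h4, h5, h6]
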